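-- pv_equiv track=rewrite | github.com/benquick123/code-profiling | code/batch-2/vse-naloge-brez-testov/DN12-M-180.py | sosedi
-- ===== SOURCE A (Python) =====
-- def sosedi(doslej, zemljevid):
--     sosedi = set()
--     for krozisce in doslej:
--         for vsak in zemljevid[krozisce]:
--             sosedi.add(vsak)
--     for krozisce in doslej:
--         if krozisce in sosedi:
--             sosedi.remove(krozisce)
--     return sosedi
-- ===== SOURCE B (Python) =====
-- def sosedi(doslej, zemljevid):
--     ds = set(doslej)
--
--     def go(nodes):
--         if not nodes:
--             return set()
--         if len(nodes) == 1:
--             return set(zemljevid[nodes[0]]) - ds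
--         mid = len(nodes) // 2
--         return go(nodes[:mid]) | go(nodes[mid:])
--
--     return go(list(doslej))
-- ===== Notes on version B (the rewrite author's own statement) =====
-- stated objective: alternative
-- what changed: B replaces A's nested elementwise add-loop plus a separate removal pass by a divide-and-conquer recursion: doslej is split in half, each singleton leaf is handled by whole-set algebra set(zemljevid[k]) - ds, and halves are merged with set union.
import Mathlib
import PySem

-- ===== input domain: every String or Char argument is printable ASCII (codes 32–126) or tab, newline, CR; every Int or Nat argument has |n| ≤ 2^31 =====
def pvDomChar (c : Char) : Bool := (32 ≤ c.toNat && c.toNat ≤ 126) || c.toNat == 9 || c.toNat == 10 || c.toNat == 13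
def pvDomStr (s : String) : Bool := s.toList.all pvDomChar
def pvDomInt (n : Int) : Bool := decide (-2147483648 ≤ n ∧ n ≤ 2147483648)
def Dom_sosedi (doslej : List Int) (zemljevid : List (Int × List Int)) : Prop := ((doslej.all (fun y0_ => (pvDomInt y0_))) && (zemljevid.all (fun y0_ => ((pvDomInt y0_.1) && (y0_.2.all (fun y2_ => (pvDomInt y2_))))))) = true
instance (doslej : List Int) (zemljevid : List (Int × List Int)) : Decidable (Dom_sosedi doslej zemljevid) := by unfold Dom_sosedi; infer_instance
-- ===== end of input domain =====

-- B collects the answer by divide-and-conquer over doslej with per-leaf set algebra (set(zemljevid[k]) - ds, union of halves) instead of A's nested add-loop plus removal pass.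


-- ===== PORT A =====
def sosedi (doslej : List Int) (zemljevid : List (Int × List Int)) : List Int :=
  let s : PySem.Set Int :=
    doslej.foldl (fun s krozisce =>
      ((zemljevid.lookup krozisce).getD []).foldl PySem.Set.add s) PySem.Set.empty
  doslej.foldl (fun s krozisce =>
    if PySem.Set.contains s krozisce then PySem.Set.discard s krozisce else s) s

-- ===== PORT B =====
-- helper go(nodes) of Source B: divide and conquer over the node list.
-- Structural recursion on a fuel bound (fuel = initial list length) is only a totality
-- guard: with nodes.length <= fuel the fuel never runs out (sosediGo_eq below).
def sosediGo (zemljevid : List (Int × List Int)) (ds : PySem.Set Int) :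
    Nat → List Int → PySem.Set Int
  | 0, _ => PySem.Set.empty
  | fuel + 1, nodes =>
    if nodes = [] then PySem.Set.empty
    else if nodes.length = 1 then
      PySem.Set.diff
        (PySem.Set.ofList ((zemljevid.lookup (PySem.List.pyGetD nodes 0 0)).getD [])) ds
    else
      let mid : Int := PySem.Int.floordiv (nodes.length : Int) 2
      PySem.Set.union (sosediGo zemljevid ds fuel (PySem.List.slice nodes none (some mid)))
                      (sosediGo zemljevid ds fuel (PySem.List.slice nodes (some mid) none))

def sosedi_alt (doslej : List Int) (zemljevid : List (Int × List Int)) : List Int :=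
  let ds : PySem.Set Int := PySem.Set.ofList doslej
  sosediGo zemljevid ds doslej.length doslej

-- ===== PRECONDITION & SPEC =====
-- Pre_ excludes exactly the inputs where A raises KeyError: some node of doslej is not a key of zemljevid.
def Pre_sosedi (doslej : List Int) (zemljevid : List (Int × List Int)) : Prop :=
  ∀ k ∈ doslej, (zemljevid.lookup k).isSome = true
instance (doslej : List Int) (zemljevid : List (Int × List Int)) : Decidable (Pre_sosedi doslej zemljevid) := by unfold Pre_sosedi; infer_instance
def pvWitness_sosedi : List Int × (List (Int × List Int)) := ([1, 2], [(1, [2, 3]), (2, [1])])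

def Spec_sosedi (doslej : List Int) (zemljevid : List (Int × List Int)) (out : List Int) : Prop := out = sosedi_alt doslej zemljevid
instance (doslej : List Int) (zemljevid : List (Int × List Int)) (out : List Int) : Decidable (Spec_sosedi doslej zemljevid out) := by unfold Spec_sosedi; infer_instance

-- ===== CLAIM (what is proved, stated in full; the proofs are below) =====
def Claim_equal_sosedi : Prop := ∀ (doslej : List Int) (zemljevid : List (Int × List Int)), Dom_sosedi doslej zemljevid → Pre_sosedi doslej zemljevid → Spec_sosedi doslej zemljevid (sosedi doslej zemljevid)

-- ===== LEMMAS AND PROOFS =====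

-- A's guarded remove-loop over ks is the same as filtering out all elements of ks.
theorem foldl_remove_eq_filter (ks : List Int) : ∀ (s : PySem.Set Int),
    ks.foldl (fun s k => if PySem.Set.contains s k then PySem.Set.discard s k else s) s
      = s.filter (fun x => !(decide (x ∈ ks))) := by
  induction ks with
  | nil => intro s; simp
  | cons k ks ih =>
    intro s
    have hstep : (if PySem.Set.contains s k then PySem.Set.discard s k else s)
        = s.filter (fun x => !(x == k)) := by
      by_cases h : k ∈ s
      · simp [pysem, h, PySem.Set.discard]
      · simp [pysem, h]
        symm
        apply List.filter_eq_self.mpr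
        intro x hx
        have hne : x ≠ k := fun he => h (he ▸ hx)
        simp [hne]
    simp only [List.foldl_cons, hstep, ih, List.filter_filter]
    congr 1
    funext x
    by_cases hx : x = k <;> by_cases hm : x ∈ ks <;> simp [hx, hm]

-- Filtering by p commutes with a single Python set-add.
theorem filter_add (p : Int → Bool) (s : PySem.Set Int) (v : Int) :
    (PySem.Set.add s v).filter p
      = if p v then PySem.Set.add (s.filter p) v else s.filter p := by
  rw [PySem.Set.add_eq_ite, PySem.Set.add_eq_ite]
  by_cases hp : p v
  · by_cases hv : v ∈ s
    · have : v ∈ s.filter p := List.mem_filter.mpr ⟨hv, hp⟩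
      simp [hp, hv, this]
    · have : v ∉ s.filter p := fun h => hv (List.mem_filter.mp h).1
      simp [hp, hv, this]
  · by_cases hv : v ∈ s <;> simp [hp, hv, List.filter_append]

-- Filtering commutes with set(xs): filter (ofList l) = ofList (filter l).
theorem filter_ofList (p : Int → Bool) (l : List Int) :
    (PySem.Set.ofList l).filter p = PySem.Set.ofList (l.filter p) := by
  induction l using List.reverseRecOn with
  | nil => rfl
  | append_singleton l x ih =>
    rw [PySem.Set.ofList_append_singleton, filter_add, List.filter_append]
    by_cases hp : p x
    · simp [hp, ih, PySem.Set.ofList_append_singleton]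
    · simp [hp, ih]

-- A's nested collection loop builds set(flatten of the neighbour lists).
theorem collect_eq_update (nbrs : Int → List Int) (ks : List Int) : ∀ (s : PySem.Set Int),
    ks.foldl (fun s k => (nbrs k).foldl PySem.Set.add s) s
      = PySem.Set.update s (ks.flatMap nbrs) := by
  induction ks with
  | nil => intro s; simp [PySem.Set.update]
  | cons k ks ih =>
    intro s
    simp only [List.foldl_cons, ih, List.flatMap_cons, PySem.Set.update, List.foldl_append]

-- union of two sets is update, and update by a set equals update by its underlying list.
theorem union_ofList_ofList (a b : List Int) :
    PySem.Set.union (PySem.Set.ofList a) (PySem.Set.ofList b)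
      = PySem.Set.ofList (a ++ b) := by
  rw [PySem.Set.ofList_append, PySem.Set.union]
  rw [PySem.Set.update_eq_append_filter, PySem.Set.update_eq_append_filter,
    PySem.Set.ofList_ofList]

-- diff is a filter on the left set.
theorem diff_eq_filter (s t : PySem.Set Int) :
    PySem.Set.diff s t = s.filter (fun x => !(PySem.Set.contains t x)) := by
  rfl

-- Characterisation of B's divide-and-conquer helper (enough fuel never runs out).
theorem sosediGo_eq (zemljevid : List (Int × List Int)) (ds : PySem.Set Int)
    (fuel : Nat) : ∀ (nodes : List Int), nodes.length ≤ fuel →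
    sosediGo zemljevid ds fuel nodes
      = PySem.Set.ofList
          ((nodes.flatMap (fun k => (zemljevid.lookup k).getD [])).filter
            (fun x => !(PySem.Set.contains ds x))) := by
  induction fuel with
  | zero =>
    intro nodes h
    have : nodes = [] := List.eq_nil_of_length_eq_zero (Nat.le_zero.mp h)
    subst this; rfl
  | succ fuel ih =>
    intro nodes h
    by_cases hne : nodes = []
    · subst hne; rfl
    · by_cases h1 : nodes.length = 1
      · match nodes, h1 with
        | [k], _ =>
          simp [sosediGo, diff_eq_filter, filter_ofList, PySem.List.pyGetD]
      · rw [sosediGo]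
        simp only [if_neg hne, if_neg h1]
        have h2 : 2 ≤ nodes.length := by
          rcases Nat.lt_or_ge nodes.length 2 with hlt | hge
          · interval_cases hl : nodes.length <;> simp_all
          · exact hge
        have hmid : PySem.Int.floordiv ((nodes.length : Int)) 2
            = ((nodes.length / 2 : Nat) : Int) := by
          exact_mod_cast PySem.Int.floordiv_natCast nodes.length 2
        rw [hmid, PySem.List.slice_to_natCast, PySem.List.slice_from_natCast]
        rw [ih _ (by simp only [List.length_take]; omega),
          ih _ (by simp only [List.length_drop]; omega)]
        rw [union_ofList_ofList, ← List.filter_append, ← List.flatMap_append,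
          List.take_append_drop]

-- ===== VERDICT (by name: the statement is the Claim_ definition above) =====
theorem sosedi_spec : Claim_equal_sosedi := by
  intro doslej zemljevid _ _
  show sosedi doslej zemljevid = sosedi_alt doslej zemljevid
  simp only [sosedi, sosedi_alt]
  rw [collect_eq_update, sosediGo_eq _ _ _ _ (Nat.le_refl _), foldl_remove_eq_filter,
    PySem.Set.update_empty, filter_ofList]
  congr 2
  funext x
  simp [pysem]
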